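-- pv_equiv track=rewrite | github.com/depthwc/AutoReport1C | cash register/cash_register.py | format_money_input_text
-- ===== SOURCE A (Python) =====
-- def format_money_input_text(raw_text: str) -> str:
--     text = raw_text.strip().replace(" ", "").replace(",", ".")
--     if not text:
--         return ""
--
--     cleaned: list[str] = []
--     dot_used = False
--     for char in text:
--         if char.isdigit():
--             cleaned.append(char)
--         elif char == "." and not dot_used:
--             cleaned.append(char)
--             dot_used = True
--
--     normalized = "".join(cleaned)
--     if not normalized:
--         return ""
--
--     has_decimal_separator = "." in normalized
--     if has_decimal_separator:
--         whole, fraction = normalized.split(".", 1)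
--         fraction = "".join(ch for ch in fraction if ch.isdigit())[:2]
--     else:
--         whole, fraction = normalized, ""
--
--     if whole:
--         grouped_whole = f"{int(whole):,}".replace(",", " ")
--     else:
--         grouped_whole = "0" if fraction else ""
--
--     if fraction:
--         return f"{grouped_whole}.{fraction}"
--     if has_decimal_separator:
--         return f"{grouped_whole}."
--     return grouped_whole
-- ===== SOURCE B (Python) =====
-- def format_money_input_text(raw_text: str) -> str:
--     text = raw_text.strip().replace(" ", "").replace(",", ".")
--     left, sep, right = text.partition(".")
--     whole = "".join(c for c in left if c.isdigit())
--     fraction = "".join(c for c in right if c.isdigit())[:2]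
--     if whole:
--         grouped = f"{int(whole):,}".replace(",", " ")
--     else:
--         grouped = "0" if fraction else ""
--     return f"{grouped}.{fraction}" if sep else grouped
-- ===== Notes on version B (the rewrite author's own statement) =====
-- stated objective: simpler
-- what changed: Replaces the flag-guarded character loop that builds `normalized`, the re-split/re-filter of it, and the four early-return/branch endings by a single partition of the cleaned text at its first dot, one digit filter per side, and one assembly expression (the empty-input and empty-normalized early returns fall out as the natural value of that expression).
import Mathlib
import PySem

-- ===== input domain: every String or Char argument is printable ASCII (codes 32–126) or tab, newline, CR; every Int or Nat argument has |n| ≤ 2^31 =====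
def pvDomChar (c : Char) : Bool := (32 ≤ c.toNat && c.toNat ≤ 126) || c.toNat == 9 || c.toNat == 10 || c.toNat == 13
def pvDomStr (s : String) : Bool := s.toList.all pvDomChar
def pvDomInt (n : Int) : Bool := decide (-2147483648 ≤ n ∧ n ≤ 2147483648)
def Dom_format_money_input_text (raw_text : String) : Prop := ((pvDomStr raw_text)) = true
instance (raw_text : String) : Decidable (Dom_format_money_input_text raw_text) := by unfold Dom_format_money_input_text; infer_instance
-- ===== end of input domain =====

-- B replaces A's flag-guarded cleaning loop + re-split of `normalized` + four-way ending by one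
-- partition at the first dot, a digit filter per side, and a single assembly expression ("simpler").

-- Shared preprocessing line of both Pythons: raw_text.strip().replace(" ", "").replace(",", ".")
def pvPre (raw_text : String) : List Char :=
  (PySem.Str.replace (PySem.Str.replace (PySem.Str.strip raw_text) " " "") "," ".").toList

-- f"{n:,}" for n ≥ 0: insert ',' every three digits from the right (hand port of the format
-- builtin, exact for the nonnegative ints it is applied to here)
def pvCommaRev : List Char → List Char
  | a :: b :: c :: d :: rest => a :: b :: c :: ',' :: pvCommaRev (d :: rest)
  | l => l

-- f"{int(whole):,}".replace(",", " ") — shared builtin tail of both Pythons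
-- (int(whole) never raises where this is called: whole is a nonempty digit string, so getD 0 is exact)
def pvGroup (whole : List Char) : List Char :=
  PySem.Chars.replace
    ((pvCommaRev ((PySem.Int.toChars ((PySem.Int.ofChars? whole).getD 0)).reverse)).reverse)
    [','] [' ']

-- ===== PORT A =====
-- the loop: cleaned.append on digits, first dot only (dot_used flag)
def pvStepA (st : List Char × Bool) (c : Char) : List Char × Bool :=
  if PySem.Chars.isdigit c then (st.1 ++ [c], st.2)
  else if c = '.' ∧ st.2 = false then (st.1 ++ [c], true)
  else st

def format_money_input_text (raw_text : String) : String :=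
  let text := pvPre raw_text
  if text = [] then "" else
  let normalized := (text.foldl pvStepA ([], false)).1
  if normalized = [] then "" else
  -- "." in normalized : single-character membership, exact as list membership
  let has_decimal := normalized.contains '.'
  -- normalized.split(".", 1): part before the first '.', part after it (exact: the dot is present)
  let wf : List Char × List Char :=
    if has_decimal then
      (normalized.takeWhile (· ≠ '.'),
       -- "".join(ch for ch in fraction if ch.isdigit())[:2]
       (((normalized.dropWhile (· ≠ '.')).tail).filter PySem.Chars.isdigit).take 2)
    else (normalized, [])
  let grouped := if wf.1 ≠ [] then pvGroup wf.1 else if wf.2 ≠ [] then ['0'] else []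
  if wf.2 ≠ [] then String.ofList (grouped ++ '.' :: wf.2)
  else if has_decimal then String.ofList (grouped ++ ['.'])
  else String.ofList grouped

-- ===== PORT B =====
def format_money_input_text_alt (raw_text : String) : String :=
  let text := pvPre raw_text
  -- text.partition("."): left of the first dot / was there a dot / right of it (exact hand port)
  let sep := text.contains '.'
  let left := text.takeWhile (· ≠ '.')
  let right := (text.dropWhile (· ≠ '.')).tail
  let whole := left.filter PySem.Chars.isdigit
  let fraction := (right.filter PySem.Chars.isdigit).take 2
  let grouped := if whole ≠ [] then pvGroup whole else if fraction ≠ [] then ['0'] else []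
  if sep then String.ofList (grouped ++ '.' :: fraction) else String.ofList grouped

-- ===== PRECONDITION & SPEC =====
def Spec_format_money_input_text (raw_text : String) (out : String) : Prop := out = format_money_input_text_alt raw_text
instance (raw_text : String) (out : String) : Decidable (Spec_format_money_input_text raw_text out) := by unfold Spec_format_money_input_text; infer_instance

-- ===== CLAIM (what is proved, stated in full; the proofs are below) =====
def Claim_equal_format_money_input_text : Prop := ∀ (raw_text : String), Dom_format_money_input_text raw_text → Spec_format_money_input_text raw_text (format_money_input_text raw_text)

-- ===== LEMMAS AND PROOFS =====

-- recursive model of A's cleaning loop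
def cleanGo : List Char → Bool → List Char
  | [], _ => []
  | c :: rest, dot =>
    if PySem.Chars.isdigit c then c :: cleanGo rest dot
    else if c = '.' ∧ dot = false then c :: cleanGo rest true
    else cleanGo rest dot

theorem foldl_pvStepA (t : List Char) (acc : List Char) (dot : Bool) :
    (t.foldl pvStepA (acc, dot)).1 = acc ++ cleanGo t dot := by
  induction t generalizing acc dot with
  | nil => simp [cleanGo]
  | cons c rest ih =>
    simp only [List.foldl_cons, pvStepA, cleanGo]
    split_ifs with h1 h2 <;> simp [ih]

theorem cleanGo_true (t : List Char) : cleanGo t true = t.filter PySem.Chars.isdigit := by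
  induction t with
  | nil => simp [cleanGo]
  | cons c rest ih =>
    by_cases h : PySem.Chars.isdigit c
    · simp [cleanGo, h, ih]
    · simp [cleanGo, h, ih]

theorem filter_isdigit_ne_dot (t : List Char) :
    ∀ c ∈ t.filter PySem.Chars.isdigit, c ≠ '.' := by
  intro c hc
  rcases List.mem_filter.mp hc with ⟨-, hd⟩
  rintro rfl
  exact absurd hd (by decide)

theorem cleanGo_false (t : List Char) :
    cleanGo t false =
      if '.' ∈ t then
        (t.takeWhile (· ≠ '.')).filter PySem.Chars.isdigit ++
          '.' :: ((t.dropWhile (· ≠ '.')).tail.filter PySem.Chars.isdigit)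
      else t.filter PySem.Chars.isdigit := by
  induction t with
  | nil => simp [cleanGo]
  | cons c rest ih =>
    by_cases hd : PySem.Chars.isdigit c
    · have hne : c ≠ '.' := by rintro rfl; exact absurd hd (by decide)
      simp only [cleanGo, hd, if_pos, ih, List.mem_cons, List.takeWhile_cons,
        List.dropWhile_cons, List.filter_cons]
      by_cases hmem : '.' ∈ rest <;> simp [hne, hmem, hd, Ne.symm hne]
    · by_cases hc : c = '.'
      · subst hc
        simp only [cleanGo, hd, cleanGo_true]
        simp
      · simp only [cleanGo, hd, List.mem_cons, List.takeWhile_cons, List.dropWhile_cons,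
          List.filter_cons]
        simp [hc, hd, ih, Ne.symm hc]

theorem takeWhile_no_dot {W : List Char} (F : List Char) (hW : ∀ c ∈ W, c ≠ '.') :
    (W ++ '.' :: F).takeWhile (· ≠ '.') = W := by
  simp [List.takeWhile_append]
  exact fun _ x hx => hW x hx

theorem dropWhile_no_dot {W : List Char} (F : List Char) (hW : ∀ c ∈ W, c ≠ '.') :
    (W ++ '.' :: F).dropWhile (· ≠ '.') = '.' :: F := by
  simp [List.dropWhile_append]
  exact fun _ x hx => hW x hx

-- ===== VERDICT (by name: the statement is the Claim_ definition above) =====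
theorem format_money_input_text_spec : Claim_equal_format_money_input_text := by
  intro raw _
  show format_money_input_text raw = format_money_input_text_alt raw
  unfold format_money_input_text format_money_input_text_alt
  generalize pvPre raw = t
  simp only [foldl_pvStepA, List.nil_append, cleanGo_false]
  by_cases hdot : '.' ∈ t
  · -- a dot is present in the cleaned text
    have ht : t ≠ [] := by rintro rfl; simp at hdot
    set W := (t.takeWhile (· ≠ '.')).filter PySem.Chars.isdigit with hWdef
    set F := (t.dropWhile (· ≠ '.')).tail.filter PySem.Chars.isdigit with hFdef
    have hWnd : ∀ c ∈ W, c ≠ '.' := filter_isdigit_ne_dot _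
    have htW : (W ++ '.' :: F).takeWhile (· ≠ '.') = W := takeWhile_no_dot F hWnd
    have hdW : (W ++ '.' :: F).dropWhile (· ≠ '.') = '.' :: F := dropWhile_no_dot F hWnd
    have hFF : F.filter PySem.Chars.isdigit = F := by
      rw [hFdef, List.filter_filter]; simp
    have hne : W ++ '.' :: F ≠ [] := by simp
    have hc1 : (W ++ '.' :: F).contains '.' = true := by simp
    have hc2 : t.contains '.' = true := by simp [hdot]
    simp only [if_pos hdot, if_neg ht, if_neg hne, htW, hdW, List.tail_cons, hFF,
      hc1, hc2, if_true]
    by_cases hF : F.take 2 = [] <;> simp [hF]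
  · -- no dot in the cleaned text
    have hsep : t.contains '.' = false := by simp [hdot]
    have htW : t.takeWhile (· ≠ '.') = t :=
      List.takeWhile_eq_self_iff.mpr (by intro c hc; simp; rintro rfl; exact hdot hc)
    have hdrop : t.dropWhile (· ≠ '.') = [] :=
      List.dropWhile_eq_nil_iff.mpr (by intro c hc; simp; rintro rfl; exact hdot hc)
    have hcont : (t.filter PySem.Chars.isdigit).contains '.' = false := by
      rw [Bool.eq_false_iff]
      intro h
      have hm : '.' ∈ t.filter PySem.Chars.isdigit := by simpa using h
      exact filter_isdigit_ne_dot t '.' hm rfl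
    simp only [if_neg hdot, hsep, htW, hdrop, List.tail_nil, List.filter_nil,
      List.take_nil, hcont, Bool.false_eq_true, if_false]
    by_cases htn : t = []
    · subst htn; simp
    · simp only [if_neg htn]
      by_cases hN : t.filter PySem.Chars.isdigit = [] <;> simp [hN]
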